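-- pv_equiv track=rewrite | github.com/kirtisoglu/Allocation-of-Primary-Care-Centers-in-Chicago | falcomchain/tree/tree.py | _part_nodes
-- ===== SOURCE A (Python) =====
-- from collections import Counter, deque, namedtuple
--
-- def _part_nodes(successors, start):
--     """
--     Partitions the nodes of a graph into two sets.
--     based on the start node and the successors of the graph.
--
--     :param start: The start node.
--     :type start: Any
--     :param succ: The successors of the graph.
--     :type succ: Dict
--
--     :returns: A set of nodes for a particular district (only one side of the cut).
--     :rtype: Set
--     """
--
--     nodes = set()
--     queue = deque([start])
--     while queue:
--         next_node = queue.pop()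
--         if next_node not in nodes:
--             nodes.add(next_node)
--             if next_node in successors:
--                 for c in successors[next_node]:
--                     if c not in nodes:
--                         queue.append(c)
--     return nodes
-- ===== SOURCE B (Python) =====
-- def _part_nodes(successors, start):
--     """Recursive DFS collecting the nodes reachable from start.
--
--     Children are explored right-to-left, which is exactly the order in
--     which A's stack pops them; the returned set is the same either way.
--     """
--     nodes = set()
--
--     def visit(node):
--         nodes.add(node)
--         for c in reversed(successors[node]) if node in successors else ():
--             if c not in nodes:
--                 visit(c)
--
--     visit(start)
--     return nodes
-- ===== Notes on version B (the rewrite author's own statement) =====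
-- stated objective: alternative
-- what changed: Replaces A's explicit deque used as a stack with a recursive DFS helper visit() that marks a node and recurses over its not-yet-visited successors, so the worklist and its push/pop bookkeeping disappear into the call stack.
import Mathlib
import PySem

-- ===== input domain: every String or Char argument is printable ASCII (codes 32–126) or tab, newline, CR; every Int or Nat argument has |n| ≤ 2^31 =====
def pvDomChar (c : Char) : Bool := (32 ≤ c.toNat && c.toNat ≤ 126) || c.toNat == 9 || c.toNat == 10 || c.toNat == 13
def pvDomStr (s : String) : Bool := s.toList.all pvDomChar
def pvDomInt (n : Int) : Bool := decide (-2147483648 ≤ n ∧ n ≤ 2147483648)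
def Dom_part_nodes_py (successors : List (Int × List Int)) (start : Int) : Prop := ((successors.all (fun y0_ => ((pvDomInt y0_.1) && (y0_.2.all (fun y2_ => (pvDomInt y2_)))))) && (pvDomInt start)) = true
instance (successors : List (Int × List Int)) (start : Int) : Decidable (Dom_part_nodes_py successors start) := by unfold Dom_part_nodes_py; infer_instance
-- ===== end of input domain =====

-- B replaces A's explicit deque stack by a recursive DFS (call stack); same reachable set.

-- ===== PORT A =====
-- all the nodes A can ever push come from the successor lists:
def pvFlat (succ : List (Int × List Int)) : List Int := succ.flatMap (fun p => p.2)

lemma pvContains_true {s : PySem.Set Int} {x : Int} (h : x ∈ s) :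
    PySem.Set.contains s x = true := (PySem.Set.contains_iff s x).mpr h

-- termination measure for A's while-loop (helpers + decrease lemmas cited by `decreasing_by`)
def pvCard (succ : List (Int × List Int)) (nodes : PySem.Set Int) (queue : List Int) : Nat :=
  ((queue.toFinset ∪ (pvFlat succ).toFinset) \ nodes.toFinset).card

def pvMeasure (succ : List (Int × List Int)) (nodes : PySem.Set Int) (queue : List Int) : Nat :=
  ((pvFlat succ).length + 2) * pvCard succ nodes queue + queue.length

lemma pvMeasure_tail (succ : List (Int × List Int)) (nodes : PySem.Set Int) (n : Int)
    (rest : List Int) : pvMeasure succ nodes rest < pvMeasure succ nodes (n :: rest) := by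
  have hc : pvCard succ nodes rest ≤ pvCard succ nodes (n :: rest) := by
    apply Finset.card_le_card
    intro x hx
    simp only [Finset.mem_sdiff, Finset.mem_union, List.mem_toFinset, List.mem_cons] at *
    tauto
  have := Nat.mul_le_mul_left ((pvFlat succ).length + 2) hc
  simp only [pvMeasure, List.length_cons]
  omega

lemma pvMeasure_drop (succ : List (Int × List Int)) (nodes : PySem.Set Int) (n : Int)
    (rest queue' : List Int) (hn : n ∉ nodes)
    (hq : ∀ x ∈ queue', x ∈ rest ∨ x ∈ pvFlat succ)
    (hl : queue'.length ≤ (pvFlat succ).length + rest.length) :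
    pvMeasure succ (PySem.Set.add nodes n) queue' < pvMeasure succ nodes (n :: rest) := by
  have hc : pvCard succ (PySem.Set.add nodes n) queue' + 1 ≤ pvCard succ nodes (n :: rest) := by
    have hmem : n ∈ ((n :: rest).toFinset ∪ (pvFlat succ).toFinset) \ nodes.toFinset := by
      simp [hn]
    have hsub : (queue'.toFinset ∪ (pvFlat succ).toFinset) \ (PySem.Set.add nodes n).toFinset ⊆
        (((n :: rest).toFinset ∪ (pvFlat succ).toFinset) \ nodes.toFinset).erase n := by
      intro x hx
      simp only [Finset.mem_sdiff, Finset.mem_union, List.mem_toFinset, Finset.mem_erase,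
        List.mem_cons, PySem.Set.mem_add] at *
      rcases hx with ⟨hx1, hx2⟩
      refine ⟨fun hxn => hx2 (Or.inr hxn), ?_, fun hxN => hx2 (Or.inl hxN)⟩
      rcases hx1 with h | h
      · rcases hq x h with h' | h'
        · exact Or.inl (Or.inr h')
        · exact Or.inr h'
      · exact Or.inr h
    have h1 := Finset.card_le_card hsub
    have h2 := Finset.card_erase_of_mem hmem
    have h3 := Finset.card_pos.mpr ⟨n, hmem⟩
    unfold pvCard
    omega
  have := Nat.mul_le_mul_left ((pvFlat succ).length + 2) hc
  rw [Nat.mul_add, Nat.mul_one] at this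
  simp only [pvMeasure, List.length_cons]
  omega

lemma pvChild_len_le (succ : List (Int × List Int)) (p : Int × List Int) (hp : p ∈ succ) :
    p.2.length ≤ (pvFlat succ).length := by
  induction succ with
  | nil => cases hp
  | cons q l ih =>
    simp only [pvFlat, List.flatMap_cons, List.length_append]
    rcases List.mem_cons.mp hp with h | h
    · subst h; omega
    · have := ih h; simp only [pvFlat] at this; omega

lemma pvChild_mem_flat (succ : List (Int × List Int)) (p : Int × List Int) (hp : p ∈ succ)
    (c : Int) (hc : c ∈ p.2) : c ∈ pvFlat succ :=
  List.mem_flatMap.mpr ⟨p, hp, hc⟩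

-- transliteration of A: nodes = set(); queue = deque([start]); while queue: pop/visit/push.
-- The deque is stored REVERSED (head of the list = the right end of the deque, where
-- Python's .pop() removes and .append() adds), so a .pop() is a head match and the
-- for-loop's appends prepend '(children filtered by the updated nodes).reverse'.
def aLoop (succ : List (Int × List Int)) (nodes : PySem.Set Int) (queue : List Int) :
    PySem.Set Int :=
  match hq : queue with
  | [] => nodes
  | n :: rest =>
    if PySem.Set.contains nodes n then aLoop succ nodes rest
    else
      let nodes' := PySem.Set.add nodes n
      match hfind : succ.find? (fun p => p.1 == n) with   -- 'if next_node in successors'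
      | none => aLoop succ nodes' rest
      | some p =>
          aLoop succ nodes'
            (((p.2.filter (fun c => !PySem.Set.contains nodes' c)).reverse) ++ rest)
  termination_by pvMeasure succ nodes queue
  decreasing_by
  · exact pvMeasure_tail succ nodes n rest
  · apply pvMeasure_drop succ nodes n rest rest
    · intro hmem
      exact (by assumption : ¬ PySem.Set.contains nodes n = true) (pvContains_true hmem)
    · exact fun x hx => Or.inl hx
    · omega
  · apply pvMeasure_drop succ nodes n rest
    · intro hmem
      exact (by assumption : ¬ PySem.Set.contains nodes n = true) (pvContains_true hmem)
    · intro x hx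
      rcases List.mem_append.mp hx with h | h
      · exact Or.inr (pvChild_mem_flat succ _ (List.mem_of_find?_eq_some hfind) x
          (List.mem_of_mem_filter (List.mem_reverse.mp h)))
      · exact Or.inl h
    · have h1 := pvChild_len_le succ _ (List.mem_of_find?_eq_some hfind)
      have h2 := List.length_filter_le (fun c => !PySem.Set.contains (PySem.Set.add nodes n) c) p.2
      simp only [List.length_append, List.length_reverse]
      omega

def part_nodes_py (successors : List (Int × List Int)) (start : Int) : List Int :=
  aLoop successors PySem.Set.empty [start]

-- ===== PORT B =====
-- successors[node] if node in successors else (), as one lookup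
def bGet (succ : List (Int × List Int)) (n : Int) : List Int :=
  match succ.find? (fun p => p.1 == n) with
  | some p => p.2
  | none => []

-- transliteration of B: visit(node) adds node and recurses over the reversed children not
-- yet visited.  The fuel only guards totality: one unit per recursion level, and the entry
-- point passes more fuel than any chain of fresh nodes can be long (the equivalence proof
-- below in particular shows the zero-fuel branch is never reached from the entry point).
mutual
def bVisit (succ : List (Int × List Int)) (fuel : Nat) (nodes : PySem.Set Int) (node : Int) :
    PySem.Set Int :=
  match fuel with
  | 0 => nodes
  | Nat.succ fuel => bGo succ fuel (PySem.Set.add nodes node) ((bGet succ node).reverse)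
  termination_by (fuel, 0)

def bGo (succ : List (Int × List Int)) (fuel : Nat) (nodes : PySem.Set Int) (cs : List Int) :
    PySem.Set Int :=
  match cs with
  | [] => nodes
  | c :: cs' =>
      bGo succ fuel (if PySem.Set.contains nodes c then nodes else bVisit succ fuel nodes c) cs'
  termination_by (fuel, cs.length + 1)
end

def part_nodes_py_alt (successors : List (Int × List Int)) (start : Int) : List Int :=
  bVisit successors ((pvFlat successors).length + 1) PySem.Set.empty start

-- ===== PRECONDITION & SPEC =====
def Spec_part_nodes_py (successors : List (Int × List Int)) (start : Int) (out : List Int) : Prop := out = part_nodes_py_alt successors start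
instance (successors : List (Int × List Int)) (start : Int) (out : List Int) : Decidable (Spec_part_nodes_py successors start out) := by unfold Spec_part_nodes_py; infer_instance

-- ===== CLAIM (what is proved, stated in full; the proofs are below) =====
def Claim_equal_part_nodes_py : Prop := ∀ (successors : List (Int × List Int)) (start : Int), Dom_part_nodes_py successors start → Spec_part_nodes_py successors start (part_nodes_py successors start)

-- ===== LEMMAS AND PROOFS =====

-- one-step unfoldings of A's loop
lemma aLoop_nil (succ : List (Int × List Int)) (nodes : PySem.Set Int) :
    aLoop succ nodes [] = nodes := by
  rw [aLoop]

lemma aLoop_cons_mem (succ : List (Int × List Int)) (nodes : PySem.Set Int) (n : Int)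
    (rest : List Int) (h : n ∈ nodes) :
    aLoop succ nodes (n :: rest) = aLoop succ nodes rest := by
  rw [aLoop]
  simp only [pvContains_true h, if_true]

lemma aLoop_cons_none (succ : List (Int × List Int)) (nodes : PySem.Set Int) (n : Int)
    (rest : List Int) (h : n ∉ nodes) (hf : succ.find? (fun p => p.1 == n) = none) :
    aLoop succ nodes (n :: rest) = aLoop succ (PySem.Set.add nodes n) rest := by
  rw [aLoop, if_neg (by simpa using h)]
  split
  · rfl
  · rename_i p' heq
    rw [hf] at heq
    cases heq

lemma aLoop_cons_some (succ : List (Int × List Int)) (nodes : PySem.Set Int) (n : Int)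
    (rest : List Int) (p : Int × List Int) (h : n ∉ nodes)
    (hf : succ.find? (fun p => p.1 == n) = some p) :
    aLoop succ nodes (n :: rest) =
      aLoop succ (PySem.Set.add nodes n)
        ((p.2.filter (fun c => !PySem.Set.contains (PySem.Set.add nodes n) c)).reverse ++ rest) := by
  rw [aLoop, if_neg (by simpa using h)]
  split
  · rename_i heq
    rw [hf] at heq
    cases heq
  · rename_i p' heq
    rw [hf] at heq
    cases Option.some.inj heq
    rfl

-- the visited set only grows
lemma aLoop_grow (succ : List (Int × List Int)) (nodes : PySem.Set Int) (queue : List Int)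
    (x : Int) (hx : x ∈ nodes) : x ∈ aLoop succ nodes queue := by
  fun_induction aLoop succ nodes queue with
  | case1 => exact hx
  | case2 => rename_i ih; exact ih hx
  | case3 => rename_i ih; exact ih ((PySem.Set.mem_add _ _ _).mpr (Or.inl hx))
  | case4 => rename_i ih; exact ih ((PySem.Set.mem_add _ _ _).mpr (Or.inl hx))

-- A's loop splits at any point of the stack: the top part is processed first
lemma aLoop_split (succ : List (Int × List Int)) (nodes : PySem.Set Int)
    (q2 q1 : List Int) :
    aLoop succ nodes (q2 ++ q1) = aLoop succ (aLoop succ nodes q2) q1 := by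
  fun_induction aLoop succ nodes q2 with
  | case1 => rw [List.nil_append]
  | case2 =>
      rename_i nodes n rest hc ih
      rw [List.cons_append, aLoop_cons_mem succ nodes n _ ((PySem.Set.contains_iff nodes n).mp hc)]
      exact ih
  | case3 =>
      rename_i nodes n rest hc nodes' hfind ih
      rw [List.cons_append,
        aLoop_cons_none succ nodes n _ (fun h => hc (pvContains_true h)) hfind]
      exact ih
  | case4 =>
      rename_i nodes n rest hc nodes' p hfind ih
      rw [List.cons_append,
        aLoop_cons_some succ nodes n _ p (fun h => hc (pvContains_true h)) hfind,
        ← List.append_assoc]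
      exact ih

-- entries of the stack that are already visited may be dropped in advance
lemma aLoop_skip (succ : List (Int × List Int)) (l : List Int) :
    ∀ (S nodes : PySem.Set Int), (∀ x ∈ S, x ∈ nodes) →
      aLoop succ nodes (l.filter (fun c => !PySem.Set.contains S c)) = aLoop succ nodes l := by
  induction l with
  | nil => intro S nodes _; rfl
  | cons c l' ih =>
    intro S nodes hS
    by_cases hcS : c ∈ S
    · rw [List.filter_cons_of_neg (by simpa using hcS),
        aLoop_cons_mem succ nodes c l' (hS c hcS), ih S nodes hS]
    · rw [List.filter_cons_of_pos (by simpa using hcS)]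
      by_cases hcN : c ∈ nodes
      · rw [aLoop_cons_mem succ nodes c _ hcN, aLoop_cons_mem succ nodes c l' hcN,
          ih S nodes hS]
      · cases hf : succ.find? (fun p => p.1 == c) with
        | none =>
          rw [aLoop_cons_none succ nodes c _ hcN hf, aLoop_cons_none succ nodes c l' hcN hf]
          exact ih S _ (fun x hx => (PySem.Set.mem_add _ _ _).mpr (Or.inl (hS x hx)))
        | some p =>
          rw [aLoop_cons_some succ nodes c _ p hcN hf, aLoop_cons_some succ nodes c l' p hcN hf,
            aLoop_split, aLoop_split]
          exact ih S _ (fun x hx =>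
            aLoop_grow succ _ _ x ((PySem.Set.mem_add _ _ _).mpr (Or.inl (hS x hx))))

lemma bGo_all_mem (succ : List (Int × List Int)) (fuel : Nat) (ds : List Int) :
    ∀ (nodes : PySem.Set Int), (∀ c ∈ ds, c ∈ nodes) → bGo succ fuel nodes ds = nodes := by
  induction ds with
  | nil => intro nodes _; rw [bGo]
  | cons c ds' ih =>
    intro nodes h
    rw [bGo, if_pos (pvContains_true (h c List.mem_cons_self))]
    exact ih nodes (fun x hx => h x (List.mem_cons_of_mem c hx))

-- main simultaneous induction on the fuel: A's loop on a one-element stack is B's visit,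
-- and A's loop on a pushed child list is B's child loop.
lemma pvMain (succ : List (Int × List Int)) : ∀ fuel : Nat,
    (∀ (nodes : PySem.Set Int) (n : Int), n ∉ nodes →
      ((insert n (pvFlat succ).toFinset) \ nodes.toFinset).card ≤ fuel →
      aLoop succ nodes [n] = bVisit succ fuel nodes n) ∧
    (∀ (ds : List Int) (nodes : PySem.Set Int), (∀ c ∈ ds, c ∈ pvFlat succ) →
      ((pvFlat succ).toFinset \ nodes.toFinset).card ≤ fuel →
      aLoop succ nodes ds = bGo succ fuel nodes ds) := by
  intro fuel
  induction fuel with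
  | zero =>
    constructor
    · intro nodes n hn hcard
      exact absurd hcard (by
        simp only [Nat.le_zero, Finset.card_eq_zero, Finset.sdiff_eq_empty_iff_subset]
        intro hsub
        exact hn (by simpa using hsub (Finset.mem_insert_self n _)))
    · intro ds nodes hds hcard
      have hall : ∀ c ∈ ds, c ∈ nodes := by
        intro c hc
        by_contra hcn
        have hmem : c ∈ (pvFlat succ).toFinset \ nodes.toFinset := by
          simp [hds c hc, hcn]
        have := Finset.card_pos.mpr ⟨c, hmem⟩
        omega
      rw [bGo_all_mem succ 0 ds nodes hall,
        ← aLoop_skip succ ds nodes nodes (fun x hx => hx),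
        List.filter_eq_nil_iff.mpr (by
          intro c hc
          simpa using hall c hc), aLoop_nil]
  | succ f ihf =>
    have hmain : ∀ (nodes : PySem.Set Int) (n : Int), n ∉ nodes →
        ((insert n (pvFlat succ).toFinset) \ nodes.toFinset).card ≤ f + 1 →
        aLoop succ nodes [n] = bVisit succ (f + 1) nodes n := by
      intro nodes n hn hcard
      rw [bVisit]
      have hNadd : (PySem.Set.add nodes n).toFinset = insert n nodes.toFinset := by
        ext x
        simp only [List.mem_toFinset, PySem.Set.mem_add, Finset.mem_insert, Or.comm]
      have hcard' : ((pvFlat succ).toFinset \ (PySem.Set.add nodes n).toFinset).card ≤ f := by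
        have hmem : n ∈ (insert n (pvFlat succ).toFinset) \ nodes.toFinset := by simp [hn]
        have hsub : (pvFlat succ).toFinset \ (PySem.Set.add nodes n).toFinset ⊆
            ((insert n (pvFlat succ).toFinset) \ nodes.toFinset).erase n := by
          intro x hx
          rw [hNadd] at hx
          simp only [Finset.mem_sdiff, Finset.mem_insert, Finset.mem_erase] at *
          tauto
        have h1 := Finset.card_le_card hsub
        have h2 := Finset.card_erase_of_mem hmem
        have h3 := Finset.card_pos.mpr ⟨n, hmem⟩
        omega
      cases hf : succ.find? (fun p => p.1 == n) with
      | none =>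
        rw [aLoop_cons_none succ nodes n [] hn hf, aLoop_nil]
        have hbg : bGet succ n = [] := by simp [bGet, hf]
        rw [hbg, List.reverse_nil]
        exact (bGo_all_mem succ f [] _ (by simp)).symm
      | some p =>
        have hbg : bGet succ n = p.2 := by simp [bGet, hf]
        rw [aLoop_cons_some succ nodes n [] p hn hf, List.append_nil, hbg,
          ← List.filter_reverse,
          aLoop_skip succ p.2.reverse (PySem.Set.add nodes n) (PySem.Set.add nodes n)
            (fun x hx => hx)]
        exact ihf.2 p.2.reverse (PySem.Set.add nodes n)
          (fun c hc => pvChild_mem_flat succ p (List.mem_of_find?_eq_some hf) c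
            (List.mem_reverse.mp hc)) hcard'
    refine ⟨hmain, ?_⟩
    intro ds
    induction ds with
    | nil => intro nodes _ _; rw [aLoop_nil, bGo]
    | cons c ds' ihds =>
      intro nodes hds hcard
      by_cases hc : c ∈ nodes
      · rw [aLoop_cons_mem succ nodes c ds' hc, bGo, if_pos (pvContains_true hc)]
        exact ihds nodes (fun x hx => hds x (List.mem_cons_of_mem c hx)) hcard
      · have hcf : c ∈ pvFlat succ := hds c List.mem_cons_self
        have hins : insert c (pvFlat succ).toFinset = (pvFlat succ).toFinset :=
          Finset.insert_eq_self.mpr (by simpa using hcf)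
        have hvisit : aLoop succ nodes [c] = bVisit succ (f + 1) nodes c :=
          hmain nodes c hc (by rw [hins]; exact hcard)
        have hsplit : aLoop succ nodes (c :: ds') =
            aLoop succ (aLoop succ nodes [c]) ds' := by
          simpa using aLoop_split succ nodes [c] ds'
        rw [hsplit, bGo, if_neg (by simpa using hc), ← hvisit]
        apply ihds
        · exact fun x hx => hds x (List.mem_cons_of_mem c hx)
        · refine le_trans (Finset.card_le_card (Finset.sdiff_subset_sdiff
            (Finset.Subset.refl _) ?_)) hcard
          intro x hx
          simp only [List.mem_toFinset] at *
          exact aLoop_grow succ nodes [c] x hx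

-- ===== VERDICT (by name: the statement is the Claim_ definition above) =====
theorem part_nodes_py_spec : Claim_equal_part_nodes_py := by
  intro successors start _
  unfold Spec_part_nodes_py part_nodes_py part_nodes_py_alt
  apply (pvMain successors ((pvFlat successors).length + 1)).1
  · simp [PySem.Set.empty]
  · calc ((insert start (pvFlat successors).toFinset) \ (PySem.Set.empty : PySem.Set Int).toFinset).card
        ≤ (insert start (pvFlat successors).toFinset).card :=
          Finset.card_le_card Finset.sdiff_subset
      _ ≤ (pvFlat successors).toFinset.card + 1 := Finset.card_insert_le _ _
      _ ≤ (pvFlat successors).length + 1 := by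
          have := (pvFlat successors).toFinset_card_le
          omega
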